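-- pv_equiv track=rewrite | github.com/mccannannamary/python-classifier-2022 | pretrain_create_dataset.py | get_pretrain_label
-- ===== SOURCE A (Python) =====
-- def get_pretrain_label(data):
--     label = None
--     for l in data.split('\n'):
--         if l.startswith('# '):
--             try:
--                 label = l.split(' ')[1]
--             except:
--                 pass
--     return label
-- ===== SOURCE B (Python) =====
-- def get_pretrain_label(data):
--     for l in reversed(data.split('\n')):
--         if l[:2] == '# ':
--             tail = l[2:]
--             sp = tail.find(' ')
--             return tail if sp < 0 else tail[:sp]
--     return None
-- ===== Notes on version B (the rewrite author's own statement) =====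
-- stated objective: alternative
-- what changed: Backward search with early exit replaces A's forward pass that overwrites an accumulator, and the label is extracted by slicing the line tail up to the first space located with str.find instead of taking the second piece of a space-split under a dead try/except.
import Mathlib
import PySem

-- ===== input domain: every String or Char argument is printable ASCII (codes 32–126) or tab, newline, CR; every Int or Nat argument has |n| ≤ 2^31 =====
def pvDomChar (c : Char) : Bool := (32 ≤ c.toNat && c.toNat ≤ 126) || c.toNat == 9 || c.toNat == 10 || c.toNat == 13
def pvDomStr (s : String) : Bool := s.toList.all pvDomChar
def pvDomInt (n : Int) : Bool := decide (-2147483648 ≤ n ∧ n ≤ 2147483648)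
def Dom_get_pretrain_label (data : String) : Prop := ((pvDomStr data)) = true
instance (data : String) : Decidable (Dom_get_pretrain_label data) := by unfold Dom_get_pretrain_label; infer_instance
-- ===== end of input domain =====

-- B replaces A's forward pass that keeps overwriting an accumulator by a backward search
-- with early exit, and extracts the label by slicing up to the first space located with
-- str.find instead of split(' ')[1] under a dead try/except (objective: alternative).

-- ===== PORT A =====
-- A's loop body: if the line starts with '# ', label = l.split(' ')[1] (try/except: on
-- IndexError keep the old label — pyGet? none is exactly that case), else keep label.
def pvStepA (label : Option (List Char)) (l : List Char) : Option (List Char) :=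
  if PySem.Chars.startswith l ['#', ' '] then
    match PySem.List.pyGet? (PySem.Chars.splitOn l [' ']) 1 with
    | some x => some x
    | none => label
  else label

def get_pretrain_label (data : String) : Option String :=
  (((PySem.Chars.splitOn data.toList ['\n']).foldl pvStepA none).map String.ofList)

-- ===== PORT B =====
-- B's loop: at the first line of the reversed list whose slice l[:2] equals '# ',
-- return the slice of tail = l[2:] up to the first ' ' that find locates (-1: all of tail).
def pvScanB : List (List Char) → Option (List Char)
  | [] => none
  | l :: rest =>
    if PySem.List.slice l none (some 2) = ['#', ' '] then
      let tail := PySem.List.slice l (some 2) none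
      let sp := PySem.Chars.find tail [' ']
      some (if sp < 0 then tail else PySem.List.slice tail none (some sp))
    else pvScanB rest

def get_pretrain_label_alt (data : String) : Option String :=
  ((pvScanB (PySem.Chars.splitOn data.toList ['\n']).reverse).map String.ofList)

-- ===== PRECONDITION & SPEC =====
def Spec_get_pretrain_label (data : String) (out : Option String) : Prop := out = get_pretrain_label_alt data
instance (data : String) (out : Option String) : Decidable (Spec_get_pretrain_label data out) := by unfold Spec_get_pretrain_label; infer_instance

-- ===== CLAIM (what is proved, stated in full; the proofs are below) =====
def Claim_equal_get_pretrain_label : Prop := ∀ (data : String), Dom_get_pretrain_label data → Spec_get_pretrain_label data (get_pretrain_label data)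

-- ===== LEMMAS AND PROOFS =====

-- the value B computes from a matching line's tail l[2:]
def pvExtract (tail : List Char) : List Char :=
  if PySem.Chars.find tail [' '] < 0 then tail
  else PySem.List.slice tail none (some (PySem.Chars.find tail [' ']))

-- splitOn.go prepends acc.reverse to what it produces from an empty accumulator
theorem pv_go_acc (sep : List Char) : ∀ (fuel : Nat) (l cur : List Char) (acc : List (List Char)),
    PySem.Chars.splitOn.go sep fuel l cur acc = acc.reverse ++ PySem.Chars.splitOn.go sep fuel l cur [] := by
  intro fuel
  induction fuel with
  | zero => intro l cur acc; simp [PySem.Chars.splitOn.go]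
  | succ n ih =>
    intro l cur acc
    cases l with
    | nil => simp [PySem.Chars.splitOn.go]
    | cons c rest =>
      rw [PySem.Chars.splitOn.go, PySem.Chars.splitOn.go]
      by_cases h : sep.isPrefixOf (c :: rest) = true
      · simp only [h, if_true]
        rw [ih _ _ (cur.reverse :: acc), ih _ _ [cur.reverse]]
        simp
      · simp only [h]
        exact ih rest (c :: cur) acc

-- for a one-char separator, the first piece go yields is cur.reverse ++ takeWhile (· ≠ c)
theorem pv_go_head (c : Char) : ∀ (fuel : Nat) (l cur : List Char), l.length ≤ fuel →
    ∃ r, PySem.Chars.splitOn.go [c] fuel l cur [] = (cur.reverse ++ l.takeWhile (· ≠ c)) :: r := by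
  intro fuel
  induction fuel with
  | zero =>
    intro l cur h
    have hl : l = [] := by cases l with | nil => rfl | cons a t => simp at h
    subst hl
    exact ⟨[], by simp [PySem.Chars.splitOn.go]⟩
  | succ n ih =>
    intro l cur h
    cases l with
    | nil => exact ⟨[], by simp [PySem.Chars.splitOn.go]⟩
    | cons a rest =>
      rw [PySem.Chars.splitOn.go]
      by_cases hac : ([c].isPrefixOf (a :: rest)) = true
      · have hca : c = a := by simpa [List.isPrefixOf] using hac
        simp only [hac, if_true]
        rw [pv_go_acc]
        refine ⟨PySem.Chars.splitOn.go [c] n (List.drop [c].length (a :: rest)) [] [], ?_⟩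
        simp [← hca]
      · have hne : ¬ a = c := by
          intro hh; exact hac (by simp [List.isPrefixOf, hh])
        simp only [hac]
        obtain ⟨r, hr⟩ := ih rest (a :: cur) (by simpa using Nat.le_of_succ_le_succ h)
        refine ⟨r, ?_⟩
        rw [hr]
        simp [hne]

-- peeling the '# ' prefix off a line before splitting on ' '
theorem pv_peel (tail : List Char) :
    PySem.Chars.splitOn ('#' :: ' ' :: tail) [' '] = ['#'] :: PySem.Chars.splitOn tail [' '] := by
  show PySem.Chars.splitOn.go [' '] (('#' :: ' ' :: tail).length + 1) ('#' :: ' ' :: tail) [] []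
      = ['#'] :: PySem.Chars.splitOn.go [' '] (tail.length + 1) tail [] []
  rw [PySem.Chars.splitOn.go.eq_def]
  norm_num [List.isPrefixOf]
  rw [if_neg (by decide), PySem.Chars.splitOn.go.eq_def]
  norm_num [List.isPrefixOf]
  rw [pv_go_acc]
  simp

-- [' '] is a prefix of l.drop i exactly when l[i] is ' '
theorem pv_sp_prefix (l : List Char) (i : Nat) : [' '] <+: l.drop i ↔ l[i]? = some ' ' := by
  rw [← List.head?_drop]
  rcases h : l.drop i with _ | ⟨a, t⟩
  · simp
  · simp [List.cons_prefix_cons, eq_comm]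

-- take up to the position of the first space is takeWhile (· ≠ ' ')
theorem pv_take_tw : ∀ (l : List Char) (j : Nat), l[j]? = some ' ' →
    (∀ i, i < j → l[i]? ≠ some ' ') → l.take j = l.takeWhile (· ≠ ' ') := by
  intro l
  induction l with
  | nil => intro j hj _; simp at hj
  | cons a t ih =>
    intro j hj hmin
    cases j with
    | zero =>
      simp only [List.getElem?_cons_zero, Option.some_inj] at hj
      subst hj
      simp
    | succ k =>
      have ha : ¬ a = ' ' := by
        have := hmin 0 (Nat.succ_pos _)
        simpa using this
      simp only [List.take_succ_cons, List.takeWhile_cons]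
      rw [if_pos (by simpa using ha)]
      rw [ih k (by simpa using hj) (fun i hi => by
        have := hmin (i + 1) (by omega)
        simpa using this)]

-- B's find/slice extraction is takeWhile (· ≠ ' ')
theorem pv_extract_eq (tail : List Char) : pvExtract tail = tail.takeWhile (· ≠ ' ') := by
  unfold pvExtract
  by_cases h : PySem.Chars.find tail [' '] < 0
  · rw [if_pos h]
    have h1 : PySem.Chars.find tail [' '] = -1 :=
      le_antisymm (by omega) (PySem.Chars.neg_one_le_find _ _)
    have h2 := (PySem.Chars.find_eq_neg_one_iff tail [' ']).mp h1
    rw [List.singleton_infix_iff] at h2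
    symm
    rw [List.takeWhile_eq_self_iff]
    intro x hx
    simp only [ne_eq, decide_eq_true_eq]
    rintro rfl
    exact h2 hx
  · rw [if_neg h]
    have h0 : 0 ≤ PySem.Chars.find tail [' '] := by omega
    obtain ⟨hpre, hmin⟩ := PySem.Chars.find_spec h0
    rw [PySem.List.slice_to _ h0]
    refine pv_take_tw tail _ ?_ ?_
    · exact (pv_sp_prefix tail _).mp hpre
    · intro i hi hcontra
      exact hmin i hi ((pv_sp_prefix tail i).mpr hcontra)

-- on a matching line, A's split(' ')[1] is exactly B's extraction of l[2:]
theorem pv_match (l : List Char) (h : PySem.Chars.startswith l ['#', ' '] = true) :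
    PySem.List.pyGet? (PySem.Chars.splitOn l [' ']) 1 = some (pvExtract (l.drop 2)) := by
  rw [PySem.Chars.startswith_iff] at h
  obtain ⟨rest, rfl⟩ := h
  simp only [List.cons_append, List.nil_append]
  rw [pv_peel]
  obtain ⟨r, hr⟩ := pv_go_head ' ' (rest.length + 1) rest [] (by omega)
  have hsp : PySem.Chars.splitOn rest [' '] = (rest.takeWhile (· ≠ ' ')) :: r := by
    simpa [PySem.Chars.splitOn] using hr
  rw [hsp, pv_extract_eq]
  simp [PySem.List.pyGet?, PySem.List.pyIdx?]

-- B's branch condition is A's startswith test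
theorem pv_cond (l : List Char) :
    (PySem.List.slice l none (some 2) = ['#', ' ']) ↔ PySem.Chars.startswith l ['#', ' '] = true := by
  rw [PySem.List.slice_to _ (by norm_num : (0:Int) ≤ 2), PySem.Chars.startswith_iff,
    List.prefix_iff_eq_take]
  rw [show Int.toNat 2 = 2 from rfl, show (['#', ' '] : List Char).length = 2 from rfl]
  exact eq_comm

-- B's value expression on a line, rewritten through the slice lemmas, is pvExtract (l.drop 2)
theorem pv_val (l : List Char) :
    (let tail := PySem.List.slice l (some 2) none
     let sp := PySem.Chars.find tail [' ']
     if sp < 0 then tail else PySem.List.slice tail none (some sp)) = pvExtract (l.drop 2) := by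
  simp only [PySem.List.slice_from _ (by norm_num : (0:Int) ≤ 2)]
  rw [show Int.toNat 2 = 2 from rfl]
  norm_num [pvExtract]

-- B's search distributes over snoc
theorem pv_snoc (xs : List (List Char)) (l : List Char) :
    pvScanB (xs ++ [l]) =
      match pvScanB xs with
      | some v => some v
      | none => if PySem.Chars.startswith l ['#', ' '] then some (pvExtract (l.drop 2)) else none := by
  induction xs with
  | nil =>
    simp only [List.nil_append, pvScanB]
    by_cases hc : PySem.List.slice l none (some 2) = ['#', ' ']
    · rw [if_pos hc, if_pos ((pv_cond l).mp hc), pv_val]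
    · rw [if_neg hc, if_neg (fun hh => hc ((pv_cond l).mpr hh))]
  | cons x xs ih =>
    simp only [List.cons_append, pvScanB]
    by_cases hx : PySem.List.slice x none (some 2) = ['#', ' ']
    · simp only [hx, if_true]
    · simp only [hx, if_false]
      exact ih

-- main loop invariant: A's fold from acc equals B's backward search with acc as fallback
theorem pv_main : ∀ (lines : List (List Char)) (acc : Option (List Char)),
    lines.foldl pvStepA acc =
      match pvScanB lines.reverse with
      | some v => some v
      | none => acc := by
  intro lines
  induction lines with
  | nil => intro acc; simp [pvScanB]
  | cons l rest ih =>
    intro acc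
    simp only [List.foldl_cons, List.reverse_cons, pv_snoc]
    rw [ih]
    rcases hr : pvScanB rest.reverse with _ | v
    · by_cases hl : PySem.Chars.startswith l ['#', ' '] = true
      · simp [pvStepA, hl, pv_match l hl]
      · simp [pvStepA, hl]
    · rfl

-- ===== VERDICT (by name: the statement is the Claim_ definition above) =====
theorem get_pretrain_label_spec : Claim_equal_get_pretrain_label := by
  intro data _
  unfold Spec_get_pretrain_label get_pretrain_label get_pretrain_label_alt
  rw [pv_main]
  rcases pvScanB (PySem.Chars.splitOn data.toList ['\n']).reverse with _ | v <;> rfl
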